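-- pv_equiv track=rewrite | github.com/mstar23/Algorithm--Learning | 프로그래머스/1/135808. 과일 장수/과일 장수.py | solution
-- ===== SOURCE A (Python) =====
-- def solution(k, m, score):
--     answer = 0
--     box = []
--     temp = []
--     score.sort(reverse=True)
--     for i in score:
--         temp.append(i)
--         if(len(temp)>=m):
--             box.append(temp)
--             temp = []
--
--     for j in range(len(box)):
--         low_score = box[j][-1]
--         answer += low_score * m
--     return answer
-- ===== SOURCE B (Python) =====
-- def solution(k, m, score):
--     s = sorted(score, reverse=True)
--     return m * sum(s[j * m + m - 1] for j in range(len(s) // m))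
-- ===== Notes on version B (the rewrite author's own statement) =====
-- stated objective: simpler
-- what changed: Instead of materialising the groups of m scores in a box-of-lists loop and then scanning the boxes for their last elements, B sums the m-th element of each full group of the descending-sorted list by direct indexing (s[j*m+m-1] for j in range(len(s)//m)) and multiplies once by m.
-- outside the precondition, e.g. on solution(0, 0, [1, 2]): A returns 0, B raises ZeroDivisionError; on solution(0, -1, [1, 2]): A returns -3, B returns 0
import Mathlib
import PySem

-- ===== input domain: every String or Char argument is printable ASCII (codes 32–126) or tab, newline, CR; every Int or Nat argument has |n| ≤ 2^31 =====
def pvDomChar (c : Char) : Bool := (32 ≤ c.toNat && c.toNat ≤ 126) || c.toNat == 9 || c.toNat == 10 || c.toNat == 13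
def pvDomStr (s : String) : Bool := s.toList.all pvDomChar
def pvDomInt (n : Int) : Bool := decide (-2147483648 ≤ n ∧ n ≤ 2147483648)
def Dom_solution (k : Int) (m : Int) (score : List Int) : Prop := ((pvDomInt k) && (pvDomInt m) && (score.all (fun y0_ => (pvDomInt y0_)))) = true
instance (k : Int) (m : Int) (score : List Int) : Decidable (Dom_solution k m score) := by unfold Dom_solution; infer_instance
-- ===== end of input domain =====

-- B is a simpler re-implementation: it sums the m-th element of each full group of the
-- descending-sorted scores by direct indexing instead of materialising the groups.
-- A sorts `score` in place (a caller-visible mutation); the claim is about the return value only.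

-- ===== PORT A =====
def solution (k : Int) (m : Int) (score : List Int) : Int :=
  let s := PySem.List.sorted score (fun x => x) true
  let st := s.foldl (fun (st : List (List Int) × List Int) i =>
      let t := st.2 ++ [i]
      if m ≤ (t.length : Int) then (st.1 ++ [t], ([] : List Int)) else (st.1, t))
    (([] : List (List Int)), ([] : List Int))
  let box := st.1
  (PySem.List.pyRange 0 (box.length : Int) 1).foldl
    (fun answer j =>
      -- box[j][-1]: every appended box is nonempty, so the index -1 is always in range
      let low := (PySem.List.pyGet? (PySem.List.pyGetD box j []) (-1)).getD 0
      answer + low * m) 0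

-- ===== PORT B =====
def solution_alt (k : Int) (m : Int) (score : List Int) : Int :=
  let s := PySem.List.sorted score (fun x => x) true
  m * ((PySem.List.pyRange 0 (PySem.Int.floordiv (s.length : Int) m) 1).map
        (fun j => PySem.List.pyGetD s (j * m + m - 1) 0)).sum

-- ===== PRECONDITION & SPEC =====
-- Pre_ restricts to a positive box size m (the problem's natural domain): for m ≤ 0 A's
-- per-element boxing (answer = m * sum(score)) is an implementation artefact, and B raises
-- ZeroDivisionError at m = 0.
def Pre_solution (k : Int) (m : Int) (score : List Int) : Prop := 1 ≤ m
instance (k : Int) (m : Int) (score : List Int) : Decidable (Pre_solution k m score) := by unfold Pre_solution; infer_instance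
def pvWitness_solution : Int × Int × List Int := (4, 2, [4, 1, 2, 2, 3, 4])
def Spec_solution (k : Int) (m : Int) (score : List Int) (out : Int) : Prop := out = solution_alt k m score
instance (k : Int) (m : Int) (score : List Int) (out : Int) : Decidable (Spec_solution k m score out) := by unfold Spec_solution; infer_instance

-- ===== CLAIM (what is proved, stated in full; the proofs are below) =====
def Claim_equal_solution : Prop := ∀ (k : Int) (m : Int) (score : List Int), Dom_solution k m score → Pre_solution k m score → Spec_solution k m score (solution k m score)

-- ===== LEMMAS AND PROOFS =====

-- A's chunking step, with the box size as a Nat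
def chunkStep (m' : Nat) (st : List (List Int) × List Int) (i : Int) : List (List Int) × List Int :=
  let t := st.2 ++ [i]
  if m' ≤ t.length then (st.1 ++ [t], []) else (st.1, t)

-- box[-1] as A reads it
def lastD (b : List Int) : Int := (PySem.List.pyGet? b (-1)).getD 0

-- pick m' l c = l[c] + l[c+m'] + l[c+2m'] + …
def pick (m' : Nat) : List Int → Nat → Int
  | [], _ => 0
  | x :: xs, c => if c = 0 then x + pick m' xs (m' - 1) else pick m' xs (c - 1)

theorem lastD_snoc (t : List Int) (x : Int) : lastD (t ++ [x]) = x := by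
  simp [lastD, PySem.List.pyGet?, PySem.List.pyIdx?]

-- A's loop step agrees with chunkStep when m = ↑m'
theorem port_step_eq (m : Int) (m' : Nat) (hm : m = (m' : Int)) (s : List Int)
    (st0 : List (List Int) × List Int) :
    s.foldl (fun (st : List (List Int) × List Int) i =>
      let t := st.2 ++ [i]
      if m ≤ (t.length : Int) then (st.1 ++ [t], ([] : List Int)) else (st.1, t)) st0
    = s.foldl (chunkStep m') st0 := by
  apply PySem.List.foldl_congr_mem
  intro acc x _
  simp only [chunkStep, hm]
  split_ifs with h1 h2 <;> first | rfl | (exfalso; omega)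

theorem pick_zero_of_le (m' : Nat) (l : List Int) (c : Nat) (h : l.length ≤ c) :
    pick m' l c = 0 := by
  induction l generalizing c with
  | nil => rfl
  | cons x xs ih =>
    simp only [pick]
    rw [if_neg (by simp at h; omega)]
    exact ih (c - 1) (by simp at h; omega)

theorem pick_peel (m' : Nat) (l : List Int) (c : Nat) (h : c < l.length) :
    pick m' l c = l.getD c 0 + pick m' (l.drop (c + 1)) (m' - 1) := by
  induction l generalizing c with
  | nil => simp at h
  | cons x xs ih =>
    cases c with
    | zero => simp [pick]
    | succ c' =>
      simp only [pick, Nat.succ_ne_zero, Nat.add_sub_cancel, List.getD_cons_succ,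
        List.drop_succ_cons]
      exact ih c' (by simp at h; omega)

-- invariant of A's first loop: the sum of the boxes' last elements is `pick`
theorem chunk_invariant (m' : Nat) (hm : 0 < m') (l : List Int) :
    ∀ (box : List (List Int)) (temp : List Int), temp.length < m' →
    (((l.foldl (chunkStep m') (box, temp)).1).map lastD).sum
      = (box.map lastD).sum + pick m' l (m' - 1 - temp.length) := by
  induction l with
  | nil => intro box temp _; simp [pick]
  | cons x xs ih =>
    intro box temp htemp
    rw [List.foldl_cons]
    by_cases hfull : m' ≤ (temp ++ [x]).length
    · have h1 : chunkStep m' (box, temp) x = (box ++ [temp ++ [x]], []) := by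
        simp only [chunkStep, if_pos hfull]
      rw [h1, ih _ [] (by simpa using hm)]
      have hc : m' - 1 - temp.length = 0 := by simp at hfull ⊢; omega
      rw [hc]
      simp [pick, lastD_snoc]
      ring
    · have h1 : chunkStep m' (box, temp) x = (box, temp ++ [x]) := by
        simp only [chunkStep, if_neg hfull]
      rw [h1, ih _ _ (by simp at hfull ⊢; omega)]
      congr 1
      have hc : 0 < m' - 1 - temp.length := by simp at hfull; omega
      obtain ⟨c, hck⟩ : ∃ c, m' - 1 - temp.length = c + 1 :=
        ⟨_, (Nat.succ_pred_eq_of_pos hc).symm⟩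
      rw [hck]
      simp only [pick, Nat.succ_ne_zero, Nat.add_sub_cancel]
      congr 1
      simp at hfull ⊢
      omega

-- B's index sum equals `pick`
theorem sum_idx_eq_pick (m' : Nat) (hm : 0 < m') :
    ∀ (n : Nat) (l : List Int), l.length ≤ n →
    ((List.range (l.length / m')).map (fun j => l.getD (j * m' + m' - 1) 0)).sum
      = pick m' l (m' - 1) := by
  intro n
  induction n with
  | zero =>
    intro l hl
    have : l = [] := List.eq_nil_of_length_eq_zero (by omega)
    subst this; simp [pick]
  | succ n ih =>
    intro l hl
    by_cases hsm : l.length < m'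
    · rw [Nat.div_eq_of_lt hsm]
      simp
      rw [pick_zero_of_le m' l (m' - 1) (by omega)]
    · rw [Nat.not_lt] at hsm
      rw [Nat.div_eq_sub_div hm hsm, List.range_succ_eq_map]
      simp only [List.map_cons, List.map_map, List.sum_cons]
      rw [pick_peel m' l (m' - 1) (by omega), show m' - 1 + 1 = m' by omega]
      congr 1
      · norm_num
      · rw [← ih (l.drop m') (by simp; omega)]
        have hlen : (l.drop m').length = l.length - m' := by simp
        rw [hlen]
        refine congrArg List.sum (List.map_congr_left ?_)
        intro j hj
        simp only [Function.comp]
        rw [show Nat.succ j * m' + m' - 1 = m' + (j * m' + m' - 1) from by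
              rw [Nat.succ_mul]; omega,
            List.getD_eq_getElem?_getD, List.getD_eq_getElem?_getD, List.getElem?_drop]

theorem solution_eq_alt (k m : Int) (score : List Int) (hpre : 1 ≤ m) :
    solution k m score = solution_alt k m score := by
  obtain ⟨m', rfl⟩ : ∃ m' : Nat, m = (m' : Int) :=
    ⟨m.toNat, (Int.toNat_of_nonneg (le_trans zero_le_one hpre)).symm⟩
  have hm : 0 < m' := by exact_mod_cast hpre
  unfold solution solution_alt
  set s := PySem.List.sorted score (fun x => x) true with hs
  simp only []
  rw [port_step_eq _ m' rfl]
  rw [PySem.List.foldl_pyRange_zero_pyGetD'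
        ((s.foldl (chunkStep m') ([], [])).1) []
        (fun acc b => acc + (PySem.List.pyGet? b (-1)).getD 0 * (m' : Int)) 0]
  rw [PySem.List.foldl_add (g := fun b => (PySem.List.pyGet? b (-1)).getD 0 * (m' : Int))]
  rw [List.sum_map_mul_right]
  have hA := chunk_invariant m' hm s [] [] (by simpa using hm)
  simp only [List.map_nil, List.sum_nil, List.length_nil, Nat.sub_zero, zero_add] at hA
  have hAx : (((s.foldl (chunkStep m') ([], [])).1).map lastD).sum = pick m' s (m' - 1) := hA
  rw [show (fun b => (PySem.List.pyGet? b (-1)).getD 0) = lastD from rfl]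
  rw [hAx]
  rw [show ((s.length : Int)) = ((s.length : Nat) : Int) from rfl]
  rw [PySem.Int.floordiv_natCast s.length m']
  rw [PySem.List.pyRange_zero_nat]
  rw [List.map_map]
  have hcomp : ((fun j : Int => PySem.List.pyGetD s (j * m' + m' - 1) 0) ∘ fun k : Nat => (k : Int))
       = fun j : Nat => s.getD (j * m' + m' - 1) 0 := by
    funext j
    simp only [Function.comp]
    have h1 : (j * m' + m' - 1 : Nat) = j * m' + (m' - 1) := by omega
    have h2 : ((j : Int) * m' + m' - 1) = ((j * m' + m' - 1 : Nat) : Int) := by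
      rw [h1, Nat.cast_add, Nat.cast_mul]
      have h3 : ((m' - 1 : Nat) : Int) = (m' : Int) - 1 := by omega
      rw [h3]; ring
    rw [h2, PySem.List.pyGetD_natCast]
  rw [hcomp]
  rw [sum_idx_eq_pick m' hm s.length s le_rfl]
  ring

-- ===== VERDICT (by name: the statement is the Claim_ definition above) =====
theorem solution_spec : Claim_equal_solution := by
  intro k m score _ hpre
  unfold Spec_solution
  exact solution_eq_alt k m score hpre
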